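-- pv_equiv track=rewrite | github.com/eitanspi/polar-codes-mac | polar/decoder_interleaved.py | _get_path
-- ===== SOURCE A (Python) =====
-- def _get_path(current, target):
--     if current == target:
--         return []
--     path_up = []
--     path_down = []
--     c, t = current, target
--     while c != t:
--         if c > t:
--             c = c >> 1
--             path_up.append(c)
--         else:
--             path_down.append(t)
--             t = t >> 1
--     path_down.reverse()
--     return path_up + path_down
-- ===== SOURCE B (Python) =====
-- def _get_path(current, target):
--     if current == target:
--         return []
--     # build both root-to-node ancestor chains in full (down to index 0)
--     rc = [current]
--     while rc[-1]:
--         rc.append(rc[-1] >> 1)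
--     rc.reverse()
--     rt = [target]
--     while rt[-1]:
--         rt.append(rt[-1] >> 1)
--     rt.reverse()
--     # longest common prefix of the two chains ends at the lowest common ancestor
--     k = 0
--     while k < len(rc) and k < len(rt) and rc[k] == rt[k]:
--         k += 1
--     up = rc[k-1:-1]
--     up.reverse()
--     return up + rt[k:]
-- ===== Notes on version B (the rewrite author's own statement) =====
-- stated objective: alternative
-- what changed: Instead of A's interleaved compare-and-climb loop toward the meeting point, B materialises both full root-to-node ancestor chains, finds their longest common prefix (which ends at the lowest common ancestor), and assembles the answer from two slices of those chains.
import Mathlib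
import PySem

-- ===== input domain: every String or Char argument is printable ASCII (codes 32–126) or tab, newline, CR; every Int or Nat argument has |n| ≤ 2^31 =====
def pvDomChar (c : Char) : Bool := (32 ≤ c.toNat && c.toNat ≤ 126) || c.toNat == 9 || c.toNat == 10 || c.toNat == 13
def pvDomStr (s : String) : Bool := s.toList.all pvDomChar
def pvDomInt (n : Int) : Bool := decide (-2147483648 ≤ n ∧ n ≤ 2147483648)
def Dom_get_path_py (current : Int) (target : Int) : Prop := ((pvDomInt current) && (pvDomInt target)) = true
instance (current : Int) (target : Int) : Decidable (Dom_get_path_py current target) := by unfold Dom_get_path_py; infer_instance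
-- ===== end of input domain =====

-- B replaces A's interleaved climb toward the meeting point by building both full root-to-node
-- ancestor chains, locating their longest common prefix (= the lowest common ancestor) and
-- slicing the answer out of the chains; same result on Pre_, no speed claim.

-- ===== PORT A =====
-- A's while loop; fuel only makes the recursion total (Pre_ ∧ Dom guarantee 2^33 steps suffice;
-- on inputs excluded by Pre_ the Python loop never terminates).  c >> 1 = floor division by 2 (exact).
def pvLoopA (fuel : Nat) (c t : Int) (up down : List Int) : List Int :=
  if fuel = 0 then up ++ down.reverse
  else if c = t then up ++ down.reverse
  else if t < c then
    pvLoopA (fuel - 1) (PySem.Int.floordiv c 2) t (up ++ [PySem.Int.floordiv c 2]) down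
  else
    pvLoopA (fuel - 1) c (PySem.Int.floordiv t 2) up (down ++ [t])
termination_by fuel
decreasing_by all_goals omega

def get_path_py (current : Int) (target : Int) : List Int :=
  if current = target then [] else pvLoopA (2 ^ 33) current target [] []

-- ===== PORT B =====
-- Source B's chain-building loop 'while ch[-1]: ch.append(ch[-1] >> 1)'; 'last' carries ch[-1];
-- fuel only makes the recursion total (2^33 suffices on Pre_ ∧ Dom; outside Pre_ Python loops forever).
def pvChainLoop (fuel : Nat) (last : Int) (ch : List Int) : List Int :=
  if fuel = 0 then ch
  else if last ≠ 0 then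
    pvChainLoop (fuel - 1) (PySem.Int.floordiv last 2) (ch ++ [PySem.Int.floordiv last 2])
  else ch
termination_by fuel
decreasing_by all_goals omega

-- Source B's longest-common-prefix loop 'while k < len(rc) and k < len(rt) and rc[k] == rt[k]: k += 1'
def pvLcpLoop (rc rt : List Int) (k : Nat) : Nat :=
  if h : k < rc.length ∧ k < rt.length ∧ rc.getD k 0 = rt.getD k 0 then pvLcpLoop rc rt (k + 1)
  else k
termination_by rc.length - k
decreasing_by omega

def get_path_py_alt (current : Int) (target : Int) : List Int :=
  if current = target then []
  else
    let rc := (pvChainLoop (2 ^ 33) current [current]).reverse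
    let rt := (pvChainLoop (2 ^ 33) target [target]).reverse
    let k := pvLcpLoop rc rt 0
    let up := (PySem.List.slice rc (some ((k : Int) - 1)) (some (-1))).reverse
    up ++ PySem.List.slice rt (some (k : Int)) none

-- ===== PRECONDITION & SPEC =====
-- Pre_ excludes exactly the inputs on which Python A never returns: whenever current ≠ target and
-- either index is negative, A's while loop runs forever (e.g. _get_path(-1, 0)).  On every input
-- where A returns a value, Pre_ holds.
def Pre_get_path_py (current : Int) (target : Int) : Prop :=
  (0 ≤ current ∧ 0 ≤ target) ∨ current = target
instance (current : Int) (target : Int) : Decidable (Pre_get_path_py current target) := by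
  unfold Pre_get_path_py; infer_instance

def pvWitness_get_path_py : Int × Int := (5, 3)

def Spec_get_path_py (current : Int) (target : Int) (out : List Int) : Prop := out = get_path_py_alt current target
instance (current : Int) (target : Int) (out : List Int) : Decidable (Spec_get_path_py current target out) := by unfold Spec_get_path_py; infer_instance

-- ===== CLAIM (what is proved, stated in full; the proofs are below) =====
def Claim_equal_get_path_py : Prop := ∀ (current : Int) (target : Int), Dom_get_path_py current target → Pre_get_path_py current target → Spec_get_path_py current target (get_path_py current target)

-- ===== LEMMAS AND PROOFS =====

-- floor division of a nonnegative cast, as a cast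
theorem pv_fd (c : Nat) : PySem.Int.floordiv (c : Int) 2 = ((c / 2 : Nat) : Int) := by
  exact_mod_cast PySem.Int.floordiv_natCast c 2

-- the ancestor chain of a heap index, node down to the root region: [c, c/2, …, 1, 0]
def ancN (c : Nat) : List Nat :=
  if h : c = 0 then [0] else c :: ancN (c / 2)
termination_by c
decreasing_by omega

theorem ancN_head (c : Nat) : ancN c = c :: (ancN c).tail := by
  rw [ancN]; split <;> simp_all

theorem ancN_ne_nil (c : Nat) : ancN c ≠ [] := by
  rw [ancN_head c]; simp

theorem ancN_cons {c : Nat} (h : c ≠ 0) : ancN c = c :: ancN (c / 2) := by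
  rw [ancN]; simp [h]

theorem ancN_mem_le : ∀ (c : Nat), ∀ x ∈ ancN c, x ≤ c := by
  intro c
  induction c using Nat.strong_induction_on with
  | _ c ih =>
    intro x hx
    rw [ancN] at hx
    by_cases h : c = 0
    · simp [h] at hx; omega
    · simp only [dif_neg h, List.mem_cons] at hx
      rcases hx with rfl | hx
      · exact le_refl _
      · have := ih (c / 2) (by omega) x hx; omega

-- the meeting point of A's climb (the lowest common ancestor, down to 0)
def lcaN (c t : Nat) : Nat :=
  if c = t then c
  else if t < c then lcaN (c / 2) t
  else lcaN c (t / 2)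
termination_by c + t
decreasing_by all_goals omega

-- the combined climb of A, in Nat: ancestors of c down to the meeting point
def pvCanonUp (c t : Nat) : List Nat :=
  if c = t then []
  else if t < c then c / 2 :: pvCanonUp (c / 2) t
  else pvCanonUp c (t / 2)
termination_by c + t
decreasing_by all_goals omega

-- t and its ancestors (excluding the meeting point), in append order of A's path_down
def pvCanonDown (c t : Nat) : List Nat :=
  if c = t then []
  else if t < c then pvCanonDown (c / 2) t
  else t :: pvCanonDown c (t / 2)
termination_by c + t
decreasing_by all_goals omega

theorem pvLoopA_self (fuel : Nat) (c t : Int) (up down : List Int) (h : c = t) :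
    pvLoopA fuel c t up down = up ++ down.reverse := by
  rw [pvLoopA]
  rcases Nat.eq_zero_or_pos fuel with h0 | h0 <;> simp [h0, h]

-- A's loop computes the canonical pair of paths
theorem pvLoopA_eq (fuel : Nat) : ∀ (c t : Nat) (up down : List Int), c + t ≤ fuel →
    pvLoopA fuel (c : Int) (t : Int) up down =
      up ++ (pvCanonUp c t).map (fun n : Nat => (n : Int)) ++
        (down ++ (pvCanonDown c t).map (fun n : Nat => (n : Int))).reverse := by
  induction fuel with
  | zero =>
    intro c t up down hf
    have hc : c = 0 := by omega
    have ht : t = 0 := by omega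
    subst hc; subst ht
    rw [pvLoopA, pvCanonUp, pvCanonDown]; simp
  | succ f ih =>
    intro c t up down hf
    by_cases hct : c = t
    · subst hct
      rw [pvLoopA_self _ _ _ _ _ rfl, pvCanonUp, pvCanonDown]; simp
    · rw [pvLoopA]
      have hni : ((c : Int) = (t : Int)) = False := by
        simp [Nat.cast_inj]; exact hct
      by_cases hlt : t < c
      · have hc1 : 1 ≤ c := by omega
        rw [pvCanonUp, pvCanonDown]
        simp only [hni, if_false, Nat.cast_lt, hlt, if_true, hct, Nat.add_one_sub_one,
          Nat.succ_ne_zero, pv_fd]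
        rw [ih (c / 2) t (up ++ [((c / 2 : Nat) : Int)]) down (by omega)]
        simp
      · have hlt' : c < t := by omega
        have ht1 : 1 ≤ t := by omega
        rw [pvCanonUp, pvCanonDown]
        simp only [hni, if_false, Nat.cast_lt, hlt, hct, Nat.add_one_sub_one,
          Nat.succ_ne_zero, pv_fd]
        rw [ih c (t / 2) up (down ++ [(t : Int)]) (by omega)]
        simp

-- the chain loop of B appends exactly the (cast) tail of the ancestor chain
theorem pvChainLoop_eq (fuel : Nat) : ∀ (x : Nat) (ch : List Int), x ≤ fuel →
    pvChainLoop fuel (x : Int) ch = ch ++ ((ancN x).tail).map (fun n : Nat => (n : Int)) := by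
  induction fuel with
  | zero =>
    intro x ch hf
    have hx : x = 0 := by omega
    subst hx
    rw [pvChainLoop, ancN]; simp
  | succ f ih =>
    intro x ch hf
    rw [pvChainLoop]
    by_cases hx : x = 0
    · subst hx; rw [ancN]; simp
    · have hne : ((x : Int) ≠ 0) := by exact_mod_cast hx
      simp only [Nat.succ_ne_zero, if_false, hne, ne_eq, not_false_eq_true, if_true,
        Nat.add_one_sub_one, pv_fd]
      rw [ih (x / 2) (ch ++ [((x / 2 : Nat) : Int)]) (by omega)]
      have htail : (ancN x).tail = x / 2 :: (ancN (x / 2)).tail := by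
        rw [ancN_cons hx, List.tail_cons]
        exact ancN_head (x / 2)
      rw [htail]; simp

-- longest common prefix of two Int lists
def lcpI : List Int → List Int → Nat
  | a :: as, b :: bs => if a = b then lcpI as bs + 1 else 0
  | _, _ => 0

theorem lcpI_self (xs : List Int) : lcpI xs xs = xs.length := by
  induction xs with
  | nil => rfl
  | cons a as ih => simp [lcpI, ih]

theorem lcpI_comm : ∀ (xs ys : List Int), lcpI xs ys = lcpI ys xs := by
  intro xs
  induction xs with
  | nil => intro ys; cases ys <;> rfl
  | cons a as ih =>
    intro ys
    cases ys with
    | nil => rfl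
    | cons b bs =>
      simp only [lcpI, ih bs]
      by_cases h : a = b
      · simp [h]
      · simp only [if_neg h, if_neg (fun h' : b = a => h h'.symm)]

theorem lcpI_append_single : ∀ (xs ys : List Int) (c : Int), c ∉ ys →
    lcpI (xs ++ [c]) ys = lcpI xs ys := by
  intro xs
  induction xs with
  | nil =>
    intro ys c hc
    cases ys with
    | nil => rfl
    | cons b bs =>
      have : c ≠ b := by intro h; exact hc (by simp [h])
      simp [lcpI, this]
  | cons a as ih =>
    intro ys c hc
    cases ys with
    | nil => rfl
    | cons b bs =>
      have hcb : c ∉ bs := by intro h; exact hc (by simp [h])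
      simp only [List.cons_append, lcpI, ih bs c hcb]

-- B's index loop computes k + the longest common prefix of the two suffixes
theorem pvLcpLoop_eq (n : Nat) : ∀ (rc rt : List Int) (k : Nat), rc.length - k ≤ n →
    pvLcpLoop rc rt k = k + lcpI (rc.drop k) (rt.drop k) := by
  induction n with
  | zero =>
    intro rc rt k hn
    have hk : rc.length ≤ k := by omega
    rw [pvLcpLoop]
    have hd : rc.drop k = [] := List.drop_eq_nil_of_le hk
    simp [hd, lcpI, Nat.not_lt.2 hk]
  | succ n ih =>
    intro rc rt k hn
    rw [pvLcpLoop]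
    by_cases h : k < rc.length ∧ k < rt.length ∧ rc.getD k 0 = rt.getD k 0
    · obtain ⟨h1, h2, h3⟩ := h
      rw [dif_pos ⟨h1, h2, h3⟩, ih rc rt (k + 1) (by omega)]
      rw [List.drop_eq_getElem_cons h1, List.drop_eq_getElem_cons h2]
      have e1 : rc.getD k 0 = rc[k] := List.getD_eq_getElem rc 0 h1
      have e2 : rt.getD k 0 = rt[k] := List.getD_eq_getElem rt 0 h2
      have : rc[k] = rt[k] := by rw [← e1, ← e2, h3]
      simp [lcpI, this]
      omega
    · rw [dif_neg h]
      have hz : lcpI (rc.drop k) (rt.drop k) = 0 := by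
        by_cases h1 : k < rc.length
        · by_cases h2 : k < rt.length
          · have h3 : rc.getD k 0 ≠ rt.getD k 0 := by tauto
            rw [List.drop_eq_getElem_cons h1, List.drop_eq_getElem_cons h2]
            have e1 : rc.getD k 0 = rc[k] := List.getD_eq_getElem rc 0 h1
            have e2 : rt.getD k 0 = rt[k] := List.getD_eq_getElem rt 0 h2
            have : rc[k] ≠ rt[k] := by rw [← e1, ← e2]; exact h3
            simp [lcpI, this]
          · have : rt.drop k = [] := List.drop_eq_nil_of_le (by omega)
            rw [this]
            cases rc.drop k <;> rfl
        · have : rc.drop k = [] := List.drop_eq_nil_of_le (by omega)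
          rw [this]; rfl
      rw [hz]
      omega
-- splitting the ancestor chains at the meeting point: A's two paths are chain segments
theorem pv_split (n : Nat) : ∀ (c t : Nat), c + t ≤ n →
    ancN c = (c :: pvCanonUp c t) ++ (ancN (lcaN c t)).tail ∧
    ancN t = pvCanonDown c t ++ ancN (lcaN c t) := by
  induction n with
  | zero =>
    intro c t h
    have hc : c = 0 := by omega
    have ht : t = 0 := by omega
    subst hc; subst ht
    rw [pvCanonUp, pvCanonDown, lcaN]
    refine ⟨?_, by simp⟩
    simp only [List.cons_append]
    exact ancN_head 0
  | succ n ih =>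
    intro c t h
    by_cases hct : c = t
    · subst hct
      rw [pvCanonUp, pvCanonDown, lcaN]
      simp only [List.cons_append]
      exact ⟨ancN_head c, rfl⟩
    · by_cases hlt : t < c
      · have hc1 : 1 ≤ c := by omega
        obtain ⟨ih1, ih2⟩ := ih (c / 2) t (by omega)
        rw [pvCanonUp, pvCanonDown, lcaN]
        simp only [hct, if_false, hlt, if_true]
        constructor
        · rw [ancN_cons (by omega : c ≠ 0), ih1]; simp
        · exact ih2
      · have hlt' : c < t := by omega
        obtain ⟨ih1, ih2⟩ := ih c (t / 2) (by omega)
        rw [pvCanonUp, pvCanonDown, lcaN]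
        simp only [hct, if_false, hlt, if_false]
        constructor
        · exact ih1
        · rw [ancN_cons (by omega : t ≠ 0), ih2]; simp

-- the longest common prefix of the reversed chains is exactly the chain of the meeting point
theorem pv_lcp (n : Nat) : ∀ (c t : Nat), c + t ≤ n →
    lcpI (((ancN c).map (fun m : Nat => (m : Int))).reverse) (((ancN t).map (fun m : Nat => (m : Int))).reverse)
      = (ancN (lcaN c t)).length := by
  induction n with
  | zero =>
    intro c t h
    have hc : c = 0 := by omega
    have ht : t = 0 := by omega
    subst hc; subst ht
    rw [lcaN]
    simp [lcpI_self]
  | succ n ih =>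
    intro c t h
    by_cases hct : c = t
    · subst hct
      rw [lcaN]
      simp [lcpI_self]
    · by_cases hlt : t < c
      · have hnot : ((c : Nat) : Int) ∉ ((ancN t).map (fun m : Nat => (m : Int))).reverse := by
          intro hmem
          rw [List.mem_reverse, List.mem_map] at hmem
          obtain ⟨x, hx, hxc⟩ := hmem
          have hxt := ancN_mem_le t x hx
          have : x = c := by exact_mod_cast hxc
          omega
        rw [lcaN, if_neg hct, if_pos hlt]
        rw [ancN_cons (by omega : c ≠ 0)]
        simp only [List.map_cons, List.reverse_cons]
        rw [lcpI_append_single _ _ _ hnot]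
        exact ih (c / 2) t (by omega)
      · have hlt' : c < t := by omega
        have hnot : ((t : Nat) : Int) ∉ ((ancN c).map (fun m : Nat => (m : Int))).reverse := by
          intro hmem
          rw [List.mem_reverse, List.mem_map] at hmem
          obtain ⟨x, hx, hxc⟩ := hmem
          have hxt := ancN_mem_le c x hx
          have : x = t := by exact_mod_cast hxc
          omega
        rw [lcaN, if_neg hct, if_neg hlt]
        rw [ancN_cons (by omega : t ≠ 0)]
        simp only [List.map_cons, List.reverse_cons]
        rw [lcpI_comm, lcpI_append_single _ _ _ hnot, lcpI_comm]
        exact ih c (t / 2) (by omega)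

-- evaluating Source B's slice rc[k-1:-1] for 1 ≤ k ≤ len rc
theorem pv_slice_up (rc : List Int) (k : Nat) (h1 : 1 ≤ k) (h2 : k ≤ rc.length) :
    PySem.List.slice rc (some ((k : Int) - 1)) (some (-1)) = (rc.drop (k - 1)).dropLast := by
  have hcast : ((k : Int) - 1) = ((k - 1 : Nat) : Int) := by omega
  rw [hcast]
  simp only [PySem.List.slice, PySem.List.clampIdx_neg_one, PySem.List.clampIdx_natCast]
  rw [Nat.min_eq_left (by omega), List.dropLast_eq_take, List.length_drop]
  congr 1
  omega

-- ===== VERDICT (by name: the statement is the Claim_ definition above) =====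
theorem get_path_py_spec : Claim_equal_get_path_py := by
  intro current target hdom hpre
  unfold Spec_get_path_py
  by_cases heq : current = target
  · simp [get_path_py, get_path_py_alt, heq]
  · rcases hpre with ⟨hc, ht⟩ | hpre
    swap
    · exact absurd hpre heq
    obtain ⟨cn, rfl⟩ : ∃ cn : Nat, current = (cn : Int) := ⟨current.toNat, (Int.toNat_of_nonneg hc).symm⟩
    obtain ⟨tn, rfl⟩ : ∃ tn : Nat, target = (tn : Int) := ⟨target.toNat, (Int.toNat_of_nonneg ht).symm⟩
    have hbound : cn ≤ 2 ^ 31 ∧ tn ≤ 2 ^ 31 := by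
      unfold Dom_get_path_py pvDomInt at hdom
      simp only [Bool.and_eq_true, decide_eq_true_eq] at hdom
      omega
    rw [get_path_py, get_path_py_alt]
    simp only [heq, if_false]
    rw [pvLoopA_eq (2 ^ 33) cn tn [] [] (by omega)]
    rw [pvChainLoop_eq (2 ^ 33) cn [(cn : Int)] (by omega),
        pvChainLoop_eq (2 ^ 33) tn [(tn : Int)] (by omega)]
    have hchainc : ((cn : Int) :: ((ancN cn).tail).map (fun m : Nat => (m : Int)))
        = (ancN cn).map (fun m : Nat => (m : Int)) := by
      conv_rhs => rw [ancN_head cn, List.map_cons]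
    have hchaint : ((tn : Int) :: ((ancN tn).tail).map (fun m : Nat => (m : Int)))
        = (ancN tn).map (fun m : Nat => (m : Int)) := by
      conv_rhs => rw [ancN_head tn, List.map_cons]
    simp only [List.singleton_append, hchainc, hchaint]
    obtain ⟨hsplitC, hsplitT⟩ := pv_split (cn + tn) cn tn (le_refl _)
    have hk : pvLcpLoop (((ancN cn).map (fun m : Nat => (m : Int))).reverse)
        (((ancN tn).map (fun m : Nat => (m : Int))).reverse) 0 = (ancN (lcaN cn tn)).length := by
      rw [pvLcpLoop_eq ((((ancN cn).map (fun m : Nat => (m : Int))).reverse).length) _ _ 0 (by omega)]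
      rw [List.drop_zero, List.drop_zero, Nat.zero_add]
      exact pv_lcp (cn + tn) cn tn (le_refl _)
    rw [hk]
    have hk1 : 1 ≤ (ancN (lcaN cn tn)).length :=
      List.length_pos_iff.mpr (ancN_ne_nil (lcaN cn tn))
    have hrc : ((ancN cn).map (fun m : Nat => (m : Int))).reverse
        = (((ancN (lcaN cn tn)).tail).map (fun m : Nat => (m : Int))).reverse
          ++ ((cn :: pvCanonUp cn tn).map (fun m : Nat => (m : Int))).reverse := by
      rw [hsplitC]; simp
    have hrt : ((ancN tn).map (fun m : Nat => (m : Int))).reverse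
        = ((ancN (lcaN cn tn)).map (fun m : Nat => (m : Int))).reverse
          ++ ((pvCanonDown cn tn).map (fun m : Nat => (m : Int))).reverse := by
      rw [hsplitT]; simp
    have hlen1 : ((((ancN (lcaN cn tn)).tail).map (fun m : Nat => (m : Int))).reverse).length
        = (ancN (lcaN cn tn)).length - 1 := by
      simp
    have hlen2 : (((ancN (lcaN cn tn)).map (fun m : Nat => (m : Int))).reverse).length
        = (ancN (lcaN cn tn)).length := by simp
    have hlenrc : (ancN (lcaN cn tn)).length
        ≤ ((((ancN cn).map (fun m : Nat => (m : Int))).reverse)).length := by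
      rw [hrc, List.length_append, hlen1]
      simp only [List.length_reverse, List.length_map, List.length_cons]
      omega
    rw [pv_slice_up _ _ hk1 hlenrc]
    have hdropup : ((((ancN cn).map (fun m : Nat => (m : Int))).reverse)).drop
          ((ancN (lcaN cn tn)).length - 1)
        = ((cn :: pvCanonUp cn tn).map (fun m : Nat => (m : Int))).reverse := by
      rw [hrc, ← hlen1, List.drop_left]
    rw [hdropup]
    have hup : ((((cn :: pvCanonUp cn tn).map (fun m : Nat => (m : Int))).reverse)).dropLast
        = ((pvCanonUp cn tn).map (fun m : Nat => (m : Int))).reverse := by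
      simp
    rw [hup]
    rw [PySem.List.slice_from_natCast]
    have hdropdown : ((((ancN tn).map (fun m : Nat => (m : Int))).reverse)).drop
          ((ancN (lcaN cn tn)).length)
        = ((pvCanonDown cn tn).map (fun m : Nat => (m : Int))).reverse := by
      rw [hrt, ← hlen2, List.drop_left]
    rw [hdropdown]
    simp
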